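-- pv_equiv track=rewrite | github.com/tiwarylab/carboost | carboost/receptor/receptor_utils.py | get_hinge_like_region_indices
-- ===== SOURCE A (Python) =====
-- def get_hinge_like_region_indices(ss_info, max_gap=2, max_end_non_C=3):
--     regions = []
--     n=len(ss_info)
--     i=0
--     while i<n:
--         if ss_info[i]!="C":
--             i+=1
--             continue
--
--         start=i
--         j=i
--
--         while j<n:
--             if ss_info[j]=="C":
--                 j+=1
--                 continue
--
--             k=j
--             while k<n and ss_info[k]!="C":
--                 k += 1
--
--             gap_len = k - j
--             if k < n and gap_len <= max_gap:
--                 j = k                       # -> bridge small non 'C' island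
--             else:
--                 break
--
--         regions.append((start, j - 1))
--         i = j + 1
--
--     if not regions:
--         return None
--
--     start, end=regions[-1]
--     tail_len = (n - 1) - end
--     if tail_len <= max_end_non_C:
--         end = n - 1
--
--     return (start, end)
-- ===== SOURCE B (Python) =====
-- def get_hinge_like_region_indices(ss_info, max_gap=2, max_end_non_C=3):
--     n = len(ss_info)
--     # Tokenize into maximal runs (is_C, start, length) in one pass.
--     runs = []
--     idx = 0
--     while idx < n:
--         is_c = (ss_info[idx] == "C")
--         j = idx
--         while j < n and (ss_info[j] == "C") == is_c:
--             j += 1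
--         runs.append((is_c, idx, j - idx))
--         idx = j
--     # Walk the run list, bridging interior non-C runs of length <= max_gap;
--     # a trailing non-C run is never bridged. Keep only the last region.
--     last = None
--     m = len(runs)
--     r = 0
--     while r < m:
--         is_c, s, ln = runs[r]
--         if not is_c:
--             r += 1
--             continue
--         end = s + ln - 1
--         r += 1
--         while r + 1 < m and not runs[r][0] and runs[r][2] <= max_gap:
--             end = runs[r + 1][1] + runs[r + 1][2] - 1
--             r += 2
--         last = (s, end)
--     if last is None:
--         return None
--     start, end = last
--     if (n - 1) - end <= max_end_non_C:
--         end = n - 1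
--     return (start, end)
-- ===== Notes on version B (the rewrite author's own statement) =====
-- stated objective: alternative
-- what changed: A's three nested index-based while loops are replaced by a two-phase decomposition: one pass tokenizes the list into maximal (is_C, start, length) runs, then a walk over the run list bridges interior non-C runs of length <= max_gap and keeps the last region.
import Mathlib
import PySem

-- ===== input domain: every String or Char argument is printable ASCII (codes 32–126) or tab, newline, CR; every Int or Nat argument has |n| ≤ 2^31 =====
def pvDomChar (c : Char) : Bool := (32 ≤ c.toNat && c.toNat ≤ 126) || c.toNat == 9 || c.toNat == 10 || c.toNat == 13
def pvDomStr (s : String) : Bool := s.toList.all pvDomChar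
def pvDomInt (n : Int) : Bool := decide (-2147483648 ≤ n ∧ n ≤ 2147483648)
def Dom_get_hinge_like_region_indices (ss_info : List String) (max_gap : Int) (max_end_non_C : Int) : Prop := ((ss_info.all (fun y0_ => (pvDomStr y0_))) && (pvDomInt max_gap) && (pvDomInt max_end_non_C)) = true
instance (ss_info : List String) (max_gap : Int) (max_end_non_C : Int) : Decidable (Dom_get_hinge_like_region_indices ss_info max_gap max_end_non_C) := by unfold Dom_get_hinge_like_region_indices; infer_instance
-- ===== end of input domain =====

-- B re-implements A by a different decomposition: one tokenizing pass into maximal runs,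
-- then a walk over the run list (objective: alternative; same cost, no speed claim).

-- ===== PORT A =====
-- Loop indices are in range throughout (0 ≤ i < n), so list indexing is `List.getD` (exact).

-- inner-inner while: `while k<n and ss_info[k]!="C": k+=1`
def scanNonC (ss : List String) (k : Nat) : Nat :=
  if h : k < ss.length then
    if ss.getD k "" ≠ "C" then scanNonC ss (k + 1) else k
  else k
termination_by ss.length - k
decreasing_by omega

theorem scanNonC_ge (ss : List String) (k : Nat) : k ≤ scanNonC ss k := by
  unfold scanNonC
  split_ifs with h1 h2
  · have := scanNonC_ge ss (k + 1); omega
  · exact le_rfl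
  · exact le_rfl
termination_by ss.length - k
decreasing_by omega

theorem scanNonC_gt (ss : List String) (k : Nat) (h : k < ss.length)
    (hne : ss.getD k "" ≠ "C") : k < scanNonC ss k := by
  unfold scanNonC
  rw [dif_pos h, if_pos hne]
  have := scanNonC_ge ss (k + 1); omega

-- inner while over j (scans C's one by one, bridges small interior non-C islands);
-- `k` of the Python is inlined as `scanNonC ss j`
def bridgeJ (ss : List String) (max_gap : Int) (j : Nat) : Nat :=
  if h : j < ss.length then
    if hc : ss.getD j "" = "C" then bridgeJ ss max_gap (j + 1)
    else if scanNonC ss j < ss.length ∧ (scanNonC ss j : Int) - (j : Int) ≤ max_gap then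
      bridgeJ ss max_gap (scanNonC ss j)
    else j
  else j
termination_by ss.length - j
decreasing_by
  · omega
  · have := scanNonC_gt ss j h hc; omega

theorem bridgeJ_ge (ss : List String) (g : Int) (j : Nat) : j ≤ bridgeJ ss g j := by
  unfold bridgeJ
  split_ifs with h1 h2 h3
  · have := bridgeJ_ge ss g (j + 1); omega
  · have h4 := bridgeJ_ge ss g (scanNonC ss j)
    have := scanNonC_ge ss j
    omega
  · exact le_rfl
  · exact le_rfl
termination_by ss.length - j
decreasing_by
  · omega
  · have := scanNonC_gt ss j h1 h2; omega

-- outer while over i, accumulating `regions`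
def outerA (ss : List String) (g : Int) (i : Nat) (regions : List (Int × Int)) : List (Int × Int) :=
  if h : i < ss.length then
    if ss.getD i "" ≠ "C" then outerA ss g (i + 1) regions
    else outerA ss g (bridgeJ ss g i + 1) (regions ++ [((i : Int), (bridgeJ ss g i : Int) - 1)])
  else regions
termination_by ss.length - i
decreasing_by
  · omega
  · have := bridgeJ_ge ss g i; omega

def get_hinge_like_region_indices (ss_info : List String) (max_gap : Int) (max_end_non_C : Int) : Option (Int × Int) :=
  match (outerA ss_info max_gap 0 []).getLast? with
  | none => none
  | some (start, e) =>
      if ((ss_info.length : Int) - 1) - e ≤ max_end_non_C then some (start, (ss_info.length : Int) - 1)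
      else some (start, e)

-- ===== PORT B =====
-- run scanner: `while j < n and (ss_info[j] == "C") == is_c: j += 1`
def runEnd (ss : List String) (c : Bool) (j : Nat) : Nat :=
  if h : j < ss.length then
    if (ss.getD j "" == "C") = c then runEnd ss c (j + 1) else j
  else j
termination_by ss.length - j
decreasing_by omega

theorem runEnd_ge (ss : List String) (c : Bool) (j : Nat) : j ≤ runEnd ss c j := by
  unfold runEnd
  split_ifs with h1 h2
  · have := runEnd_ge ss c (j + 1); omega
  · exact le_rfl
  · exact le_rfl
termination_by ss.length - j
decreasing_by omega

theorem runEnd_gt (ss : List String) (c : Bool) (j : Nat) (h : j < ss.length)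
    (hc : (ss.getD j "" == "C") = c) : j < runEnd ss c j := by
  unfold runEnd
  rw [dif_pos h, if_pos hc]
  have := runEnd_ge ss c (j + 1); omega

-- tokenizer: the first pass of B, producing (is_C, start, length) runs
def tokenize (ss : List String) (idx : Nat) : List (Bool × Nat × Nat) :=
  if h : idx < ss.length then
    (ss.getD idx "" == "C", idx, runEnd ss (ss.getD idx "" == "C") idx - idx) ::
      tokenize ss (runEnd ss (ss.getD idx "" == "C") idx)
  else []
termination_by ss.length - idx
decreasing_by
  have := runEnd_gt ss (ss.getD idx "" == "C") idx h rfl; omega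

-- bridging loop of B: `while r+1 < m and not runs[r][0] and runs[r][2] <= max_gap`
def absorb (runs : List (Bool × Nat × Nat)) (g : Int) (endv : Nat) : Nat × List (Bool × Nat × Nat) :=
  match runs with
  | (false, gs, ln) :: (true, s2, l2) :: rest =>
      if (ln : Int) ≤ g then absorb rest g (s2 + l2 - 1)
      else (endv, (false, gs, ln) :: (true, s2, l2) :: rest)
  | other => (endv, other)

theorem absorb_len (runs : List (Bool × Nat × Nat)) (g : Int) (endv : Nat) :
    (absorb runs g endv).2.length ≤ runs.length := by
  match runs with
  | [] => exact Nat.le_refl _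
  | [(b, s1, l1)] => cases b <;> exact Nat.le_refl _
  | (b1, s1, l1) :: (b2, s2, l2) :: rest =>
      cases b1 <;> cases b2
      · exact Nat.le_refl _
      · simp only [absorb]
        split_ifs with hle
        · have := absorb_len rest g (s2 + l2 - 1); simp; omega
        · exact Nat.le_refl _
      · exact Nat.le_refl _
      · exact Nat.le_refl _

-- walk over the run list, keeping the last region found
def walkRuns (runs : List (Bool × Nat × Nat)) (g : Int) (last : Option (Int × Int)) : Option (Int × Int) :=
  match runs with
  | [] => last
  | (false, _, _) :: rest => walkRuns rest g last
  | (true, s, ln) :: rest =>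
      walkRuns (absorb rest g (s + ln - 1)).2 g
        (some ((s : Int), ((absorb rest g (s + ln - 1)).1 : Int)))
termination_by runs.length
decreasing_by
  · simp
  · have := absorb_len rest g (s + ln - 1); simp; omega

def get_hinge_like_region_indices_alt (ss_info : List String) (max_gap : Int) (max_end_non_C : Int) : Option (Int × Int) :=
  match walkRuns (tokenize ss_info 0) max_gap none with
  | none => none
  | some (start, e) =>
      if ((ss_info.length : Int) - 1) - e ≤ max_end_non_C then some (start, (ss_info.length : Int) - 1)
      else some (start, e)

-- ===== PRECONDITION & SPEC =====
def Spec_get_hinge_like_region_indices (ss_info : List String) (max_gap : Int) (max_end_non_C : Int) (out : Option (Int × Int)) : Prop := out = get_hinge_like_region_indices_alt ss_info max_gap max_end_non_C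
instance (ss_info : List String) (max_gap : Int) (max_end_non_C : Int) (out : Option (Int × Int)) : Decidable (Spec_get_hinge_like_region_indices ss_info max_gap max_end_non_C out) := by unfold Spec_get_hinge_like_region_indices; infer_instance

-- ===== CLAIM (what is proved, stated in full; the proofs are below) =====
def Claim_equal_get_hinge_like_region_indices : Prop := ∀ (ss_info : List String) (max_gap : Int) (max_end_non_C : Int), Dom_get_hinge_like_region_indices ss_info max_gap max_end_non_C → Spec_get_hinge_like_region_indices ss_info max_gap max_end_non_C (get_hinge_like_region_indices ss_info max_gap max_end_non_C)

-- ===== LEMMAS AND PROOFS =====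

-- step/stop closed forms (avoid unfolding a function on both sides of a goal)
theorem scanNonC_step (ss : List String) (j : Nat) (h : j < ss.length)
    (hne : ss.getD j "" ≠ "C") : scanNonC ss j = scanNonC ss (j + 1) := by
  conv_lhs => rw [scanNonC]
  rw [dif_pos h, if_pos hne]

theorem scanNonC_id_C (ss : List String) (j : Nat) (h : j < ss.length)
    (hc : ss.getD j "" = "C") : scanNonC ss j = j := by
  conv_lhs => rw [scanNonC]
  rw [dif_pos h, if_neg (not_not_intro hc)]

theorem scanNonC_id_ge (ss : List String) (j : Nat) (h : ¬ j < ss.length) :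
    scanNonC ss j = j := by
  conv_lhs => rw [scanNonC]
  rw [dif_neg h]

theorem runEnd_step (ss : List String) (c : Bool) (j : Nat) (h : j < ss.length)
    (hc : (ss.getD j "" == "C") = c) : runEnd ss c j = runEnd ss c (j + 1) := by
  conv_lhs => rw [runEnd]
  rw [dif_pos h, if_pos hc]

theorem runEnd_id_ne (ss : List String) (c : Bool) (j : Nat) (h : j < ss.length)
    (hc : (ss.getD j "" == "C") ≠ c) : runEnd ss c j = j := by
  conv_lhs => rw [runEnd]
  rw [dif_pos h, if_neg hc]

theorem runEnd_id_ge (ss : List String) (c : Bool) (j : Nat) (h : ¬ j < ss.length) :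
    runEnd ss c j = j := by
  conv_lhs => rw [runEnd]
  rw [dif_neg h]

theorem bridgeJ_stepC (ss : List String) (g : Int) (j : Nat) (h : j < ss.length)
    (hc : ss.getD j "" = "C") : bridgeJ ss g j = bridgeJ ss g (j + 1) := by
  conv_lhs => rw [bridgeJ]
  rw [dif_pos h, dif_pos hc]

theorem bridgeJ_gap (ss : List String) (g : Int) (j : Nat) (h : j < ss.length)
    (hnc : ¬ ss.getD j "" = "C") :
    bridgeJ ss g j =
      if scanNonC ss j < ss.length ∧ (scanNonC ss j : Int) - (j : Int) ≤ g then
        bridgeJ ss g (scanNonC ss j)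
      else j := by
  conv_lhs => rw [bridgeJ]
  rw [dif_pos h, dif_neg hnc]

theorem bridgeJ_id_ge (ss : List String) (g : Int) (j : Nat) (h : ¬ j < ss.length) :
    bridgeJ ss g j = j := by
  conv_lhs => rw [bridgeJ]
  rw [dif_neg h]

theorem outerA_stepNC (ss : List String) (g : Int) (i : Nat) (rs : List (Int × Int))
    (h : i < ss.length) (hnc : ss.getD i "" ≠ "C") :
    outerA ss g i rs = outerA ss g (i + 1) rs := by
  conv_lhs => rw [outerA]
  rw [dif_pos h, if_pos hnc]

theorem outerA_stepC (ss : List String) (g : Int) (i : Nat) (rs : List (Int × Int))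
    (h : i < ss.length) (hc : ss.getD i "" = "C") :
    outerA ss g i rs =
      outerA ss g (bridgeJ ss g i + 1) (rs ++ [((i : Int), (bridgeJ ss g i : Int) - 1)]) := by
  conv_lhs => rw [outerA]
  rw [dif_pos h, if_neg (not_not_intro hc)]

theorem outerA_id_ge (ss : List String) (g : Int) (i : Nat) (rs : List (Int × Int))
    (h : ¬ i < ss.length) : outerA ss g i rs = rs := by
  conv_lhs => rw [outerA]
  rw [dif_neg h]

theorem tokenize_stop (ss : List String) (idx : Nat) (h : ¬ idx < ss.length) :
    tokenize ss idx = [] := by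
  conv_lhs => rw [tokenize]
  rw [dif_neg h]

theorem tokenize_cons (ss : List String) (idx : Nat) (h : idx < ss.length) :
    tokenize ss idx =
      ((ss.getD idx "" == "C"), idx, runEnd ss (ss.getD idx "" == "C") idx - idx) ::
        tokenize ss (runEnd ss (ss.getD idx "" == "C") idx) := by
  conv_lhs => rw [tokenize]
  rw [dif_pos h]

theorem runEnd_false_eq_scanNonC (ss : List String) (j : Nat) :
    runEnd ss false j = scanNonC ss j := by
  by_cases h : j < ss.length
  · by_cases hc : ss.getD j "" = "C"
    · rw [runEnd_id_ne ss false j h (by rw [hc]; decide), scanNonC_id_C ss j h hc]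
    · rw [runEnd_step ss false j h (by simpa using hc), scanNonC_step ss j h hc]
      exact runEnd_false_eq_scanNonC ss (j + 1)
  · rw [runEnd_id_ge ss false j h, scanNonC_id_ge ss j h]
termination_by ss.length - j
decreasing_by omega

theorem scanNonC_stop (ss : List String) (j : Nat) :
    scanNonC ss j < ss.length → ss.getD (scanNonC ss j) "" = "C" := by
  by_cases h : j < ss.length
  · by_cases hc : ss.getD j "" = "C"
    · rw [scanNonC_id_C ss j h hc]; intro _; exact hc
    · rw [scanNonC_step ss j h hc]; exact scanNonC_stop ss (j + 1)
  · rw [scanNonC_id_ge ss j h]; intro hlt; exact absurd hlt h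
termination_by ss.length - j
decreasing_by omega

theorem runEnd_le (ss : List String) (c : Bool) (j : Nat) (h : j ≤ ss.length) :
    runEnd ss c j ≤ ss.length := by
  by_cases h1 : j < ss.length
  · by_cases h2 : (ss.getD j "" == "C") = c
    · rw [runEnd_step ss c j h1 h2]; exact runEnd_le ss c (j + 1) h1
    · rw [runEnd_id_ne ss c j h1 h2]; omega
  · rw [runEnd_id_ge ss c j h1]; exact h
termination_by ss.length - j
decreasing_by omega

theorem runEnd_stop (ss : List String) (c : Bool) (j : Nat) :
    runEnd ss c j < ss.length → (ss.getD (runEnd ss c j) "" == "C") ≠ c := by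
  by_cases h1 : j < ss.length
  · by_cases h2 : (ss.getD j "" == "C") = c
    · rw [runEnd_step ss c j h1 h2]; exact runEnd_stop ss c (j + 1)
    · rw [runEnd_id_ne ss c j h1 h2]; intro _; exact h2
  · rw [runEnd_id_ge ss c j h1]; intro hlt; exact absurd hlt h1
termination_by ss.length - j
decreasing_by omega

-- bridgeJ is invariant under skipping a C-run
theorem bridgeJ_runEnd_true (ss : List String) (g : Int) (j : Nat) :
    bridgeJ ss g j = bridgeJ ss g (runEnd ss true j) := by
  by_cases h : j < ss.length
  · by_cases hc : ss.getD j "" = "C"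
    · rw [bridgeJ_stepC ss g j h hc, runEnd_step ss true j h (by simpa using hc)]
      exact bridgeJ_runEnd_true ss g (j + 1)
    · rw [runEnd_id_ne ss true j h (by simpa using hc)]
  · rw [runEnd_id_ge ss true j h]
termination_by ss.length - j
decreasing_by omega

-- bridgeJ stops at a non-C position (or at n)
theorem bridgeJ_stop (ss : List String) (g : Int) (j : Nat) :
    bridgeJ ss g j < ss.length → ss.getD (bridgeJ ss g j) "" ≠ "C" := by
  by_cases h : j < ss.length
  · by_cases hc : ss.getD j "" = "C"
    · rw [bridgeJ_stepC ss g j h hc]; exact bridgeJ_stop ss g (j + 1)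
    · rw [bridgeJ_gap ss g j h hc]
      split_ifs with hk
      · exact bridgeJ_stop ss g (scanNonC ss j)
      · intro _; exact hc
  · rw [bridgeJ_id_ge ss g j h]; intro hlt; exact absurd hlt h
termination_by ss.length - j
decreasing_by
  · omega
  · have := scanNonC_gt ss j h hc; omega

-- THE GAP LEMMA: at a gap position c (c = n or ss[c] ≠ "C"), B's bridging loop
-- computes exactly A's bridgeJ result and leaves the runs suffix at that position.
theorem absorb_gap (ss : List String) (g : Int) (c : Nat) (hle : c ≤ ss.length)
    (hgap : ¬ c < ss.length ∨ ss.getD c "" ≠ "C") :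
    absorb (tokenize ss c) g (c - 1) = (bridgeJ ss g c - 1, tokenize ss (bridgeJ ss g c)) := by
  by_cases h : c < ss.length
  · have hnc : ss.getD c "" ≠ "C" := by rcases hgap with h' | h' <;> [exact absurd h h'; exact h']
    have hcb : (ss.getD c "" == "C") = false := by simpa using hnc
    have htok : tokenize ss c = (false, c, runEnd ss false c - c) :: tokenize ss (runEnd ss false c) := by
      rw [tokenize_cons ss c h, hcb]
    have hks : runEnd ss false c = scanNonC ss c := runEnd_false_eq_scanNonC ss c
    have hkge : c < runEnd ss false c := runEnd_gt ss false c h hcb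
    have hkle : runEnd ss false c ≤ ss.length := runEnd_le ss false c (le_of_lt h)
    have hbr := bridgeJ_gap ss g c h hnc
    by_cases hkn : runEnd ss false c < ss.length
    · -- the gap is interior: next run is a C-run
      have hkC : ss.getD (runEnd ss false c) "" = "C" := by
        rw [hks] at hkn ⊢; exact scanNonC_stop ss c hkn
      have hkCb : (ss.getD (runEnd ss false c) "" == "C") = true := by simpa using hkC
      have htok2 : tokenize ss (runEnd ss false c) =
          (true, runEnd ss false c,
            runEnd ss true (runEnd ss false c) - runEnd ss false c) ::
          tokenize ss (runEnd ss true (runEnd ss false c)) := by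
        rw [tokenize_cons ss (runEnd ss false c) hkn, hkCb]
      have hk2gt : runEnd ss false c < runEnd ss true (runEnd ss false c) :=
        runEnd_gt ss true (runEnd ss false c) hkn hkCb
      have hk2le : runEnd ss true (runEnd ss false c) ≤ ss.length :=
        runEnd_le ss true (runEnd ss false c) (le_of_lt hkn)
      have hcast : ((runEnd ss false c - c : Nat) : Int) = (runEnd ss false c : Int) - (c : Int) := by
        omega
      by_cases hgle : ((runEnd ss false c - c : Nat) : Int) ≤ g
      · -- bridge
        have habs : absorb (tokenize ss c) g (c - 1) =
            absorb (tokenize ss (runEnd ss true (runEnd ss false c))) g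
              (runEnd ss false c + (runEnd ss true (runEnd ss false c) - runEnd ss false c) - 1) := by
          rw [htok, htok2]
          simp only [absorb, if_pos hgle]
        have hend : runEnd ss false c + (runEnd ss true (runEnd ss false c) - runEnd ss false c) - 1
            = runEnd ss true (runEnd ss false c) - 1 := by omega
        have hgap2 : ¬ runEnd ss true (runEnd ss false c) < ss.length ∨
            ss.getD (runEnd ss true (runEnd ss false c)) "" ≠ "C" := by
          by_cases hk2n : runEnd ss true (runEnd ss false c) < ss.length
          · right
            intro hcc
            exact runEnd_stop ss true (runEnd ss false c) hk2n (by simpa using hcc)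
          · left; exact hk2n
        have hrec := absorb_gap ss g (runEnd ss true (runEnd ss false c)) hk2le hgap2
        have hbrk : bridgeJ ss g c = bridgeJ ss g (runEnd ss true (runEnd ss false c)) := by
          rw [hbr, if_pos ⟨by rwa [← hks], by rw [← hks]; omega⟩, ← hks]
          exact bridgeJ_runEnd_true ss g (runEnd ss false c)
        rw [habs, hend, hrec, hbrk]
      · -- gap too wide: stop
        have habs : absorb (tokenize ss c) g (c - 1) = (c - 1, tokenize ss c) := by
          rw [htok, htok2]
          simp only [absorb, if_neg hgle]
        have hbrc : bridgeJ ss g c = c := by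
          rw [hbr, if_neg]
          rintro ⟨h1, h2⟩
          rw [← hks] at h1 h2
          omega
        rw [habs, hbrc]
    · -- trailing gap: single final non-C run, never bridged
      have htok2 : tokenize ss (runEnd ss false c) = [] := tokenize_stop ss (runEnd ss false c) hkn
      have habs : absorb (tokenize ss c) g (c - 1) = (c - 1, tokenize ss c) := by
        rw [htok, htok2]
        rfl
      have hbrc : bridgeJ ss g c = c := by
        rw [hbr, if_neg]
        rintro ⟨h1, _⟩
        rw [← hks] at h1
        exact hkn h1
      rw [habs, hbrc]
  · have htok : tokenize ss c = [] := tokenize_stop ss c h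
    have hbrc : bridgeJ ss g c = c := bridgeJ_id_ge ss g c h
    rw [htok, hbrc, htok]
    rfl
termination_by ss.length - c
decreasing_by omega

-- outerA accumulates by appending
theorem outerA_acc (ss : List String) (g : Int) (i : Nat) (rs : List (Int × Int)) :
    outerA ss g i rs = rs ++ outerA ss g i [] := by
  by_cases h : i < ss.length
  · by_cases hc : ss.getD i "" = "C"
    · have hb := bridgeJ_ge ss g i
      rw [outerA_stepC ss g i rs h hc, outerA_stepC ss g i [] h hc]
      simp only [List.nil_append]
      rw [outerA_acc ss g (bridgeJ ss g i + 1) (rs ++ [((i : Int), (bridgeJ ss g i : Int) - 1)]),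
        outerA_acc ss g (bridgeJ ss g i + 1) ([((i : Int), (bridgeJ ss g i : Int) - 1)])]
      simp
    · rw [outerA_stepNC ss g i rs h hc, outerA_stepNC ss g i [] h hc]
      exact outerA_acc ss g (i + 1) rs
  · rw [outerA_id_ge ss g i rs h, outerA_id_ge ss g i [] h]
    simp
termination_by ss.length - i
decreasing_by all_goals omega

-- outerA skips a whole non-C run at once
theorem outerA_skip (ss : List String) (g : Int) (i : Nat) (rs : List (Int × Int))
    (h : i < ss.length) (hnc : ss.getD i "" ≠ "C") :
    outerA ss g i rs = outerA ss g (scanNonC ss i) rs := by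
  rw [outerA_stepNC ss g i rs h hnc, scanNonC_step ss i h hnc]
  by_cases h1 : i + 1 < ss.length
  · by_cases h2 : ss.getD (i + 1) "" = "C"
    · rw [scanNonC_id_C ss (i + 1) h1 h2]
    · exact outerA_skip ss g (i + 1) rs h1 h2
  · rw [scanNonC_id_ge ss (i + 1) h1]
termination_by ss.length - i
decreasing_by omega

theorem getLast?_cons_or {α : Type} (r : α) (L : List α) :
    (r :: L).getLast? = L.getLast?.or (some r) := by
  induction L generalizing r with
  | nil => rfl
  | cons x xs ih =>
      rw [List.getLast?_cons_cons, ih x]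
      cases xs.getLast? <;> rfl

theorem or_some_or {α : Type} (x : Option α) (a : α) (y : Option α) :
    (x.or (some a)).or y = x.or (some a) := by
  cases x <;> rfl

-- MAIN CORRESPONDENCE: B's walk over the runs from position i computes the last
-- region A's outer loop appends from position i (or `last` if none is appended).
theorem walk_main (ss : List String) (g : Int) (i : Nat) (last : Option (Int × Int)) :
    walkRuns (tokenize ss i) g last = ((outerA ss g i []).getLast?).or last := by
  by_cases h : i < ss.length
  · by_cases hc : ss.getD i "" = "C"
    · -- C-run: a region starts here
      have hcb : (ss.getD i "" == "C") = true := by simpa using hc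
      have htok : tokenize ss i =
          (true, i, runEnd ss true i - i) :: tokenize ss (runEnd ss true i) := by
        rw [tokenize_cons ss i h, hcb]
      have hcgt : i < runEnd ss true i := runEnd_gt ss true i h hcb
      have hcle : runEnd ss true i ≤ ss.length := runEnd_le ss true i (le_of_lt h)
      have hgapc : ¬ runEnd ss true i < ss.length ∨ ss.getD (runEnd ss true i) "" ≠ "C" := by
        by_cases hcn : runEnd ss true i < ss.length
        · right; intro hcc
          exact runEnd_stop ss true i hcn (by simpa using hcc)
        · left; exact hcn
      have hJc : bridgeJ ss g i = bridgeJ ss g (runEnd ss true i) := bridgeJ_runEnd_true ss g i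
      have hJge : runEnd ss true i ≤ bridgeJ ss g (runEnd ss true i) :=
        bridgeJ_ge ss g (runEnd ss true i)
      have hend : i + (runEnd ss true i - i) - 1 = runEnd ss true i - 1 := by omega
      have hgapl := absorb_gap ss g (runEnd ss true i) hcle hgapc
      have hLHS : walkRuns (tokenize ss i) g last =
          walkRuns (tokenize ss (bridgeJ ss g (runEnd ss true i))) g
            (some ((i : Int), ((bridgeJ ss g (runEnd ss true i) - 1 : Nat) : Int))) := by
        rw [htok]
        simp only [walkRuns]
        rw [hend, hgapl]
      rw [hLHS, walk_main ss g (bridgeJ ss g (runEnd ss true i))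
        (some ((i : Int), ((bridgeJ ss g (runEnd ss true i) - 1 : Nat) : Int)))]
      -- the A side
      have hA : outerA ss g i [] =
          ((i : Int), (bridgeJ ss g i : Int) - 1) :: outerA ss g (bridgeJ ss g i + 1) [] := by
        rw [outerA_stepC ss g i [] h hc, outerA_acc ss g (bridgeJ ss g i + 1) _]
        rfl
      have hJskip : outerA ss g (bridgeJ ss g i) ([] : List (Int × Int)) =
          outerA ss g (bridgeJ ss g i + 1) [] := by
        by_cases hJn : bridgeJ ss g i < ss.length
        · exact outerA_stepNC ss g (bridgeJ ss g i) [] hJn (bridgeJ_stop ss g i hJn)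
        · rw [outerA_id_ge ss g (bridgeJ ss g i) [] hJn,
            outerA_id_ge ss g (bridgeJ ss g i + 1) [] (by omega)]
      have hcast : ((bridgeJ ss g (runEnd ss true i) - 1 : Nat) : Int)
          = (bridgeJ ss g i : Int) - 1 := by rw [hJc]; omega
      rw [hA, ← hJskip, getLast?_cons_or, or_some_or, hcast, hJc]
    · -- non-C run: both sides skip it
      have hcb : (ss.getD i "" == "C") = false := by simpa using hc
      have htok : tokenize ss i =
          (false, i, runEnd ss false i - i) :: tokenize ss (runEnd ss false i) := by
        rw [tokenize_cons ss i h, hcb]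
      have hks : runEnd ss false i = scanNonC ss i := runEnd_false_eq_scanNonC ss i
      have hgt : i < scanNonC ss i := scanNonC_gt ss i h hc
      have hLHS : walkRuns (tokenize ss i) g last = walkRuns (tokenize ss (scanNonC ss i)) g last := by
        rw [htok, hks]
        simp only [walkRuns]
      rw [hLHS, walk_main ss g (scanNonC ss i) last, outerA_skip ss g i [] h hc]
  · have htok : tokenize ss i = [] := tokenize_stop ss i h
    rw [htok, outerA_id_ge ss g i [] h]
    simp [walkRuns]
termination_by ss.length - i
decreasing_by all_goals omega

-- ===== VERDICT (by name: the statement is the Claim_ definition above) =====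
theorem get_hinge_like_region_indices_spec : Claim_equal_get_hinge_like_region_indices := by
  intro ss g e _
  unfold Spec_get_hinge_like_region_indices
  unfold get_hinge_like_region_indices get_hinge_like_region_indices_alt
  rw [walk_main ss g 0 none, Option.or_none]
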